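-- pv_equiv track=rewrite | github.com/carlzimmerman/zimmerman-formula | research/proof_attempt/paired_difference_cancellation.py | compute_Dk_e_at_n
-- ===== SOURCE A (Python) =====
-- def compute_Dk_e_at_n(n, k):
--     """Compute (D^k e)_n recursively with memoization."""
--     memo = {}
--     def helper(n, k):
--         if (n, k) in memo:
--             return memo[(n, k)]
--         if k == 0:
--             return 1
--         if n < 2:
--             return 0
--         total = 0
--         for d in range(2, n + 1):
--             total += helper(n // d, k - 1)
--         memo[(n, k)] = total
--         return total
--     return helper(n, k)
-- ===== SOURCE B (Python) =====
-- def compute_Dk_e_at_n(n, k):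
--     """Compute (D^k e)_n with memoization, using floor-division block
--     decomposition: the O(n) inner sum over d in [2, n] is replaced by a sum
--     over the O(sqrt(n)) distinct values q = n // d, each weighted by the
--     number of d's sharing that quotient."""
--     memo = {}
--     def helper(n, k):
--         if k == 0:
--             return 1
--         if n < 2:
--             return 0
--         key = (n, k)
--         if key in memo:
--             return memo[key]
--         total = 0
--         d = 2
--         while d <= n:
--             q = n // d
--             d2 = n // q
--             total += (d2 - d + 1) * helper(q, k - 1)
--             d = d2 + 1
--         memo[key] = total
--         return total
--     return helper(n, k)
-- ===== Notes on version B (the rewrite author's own statement) =====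
-- stated objective: faster
-- what changed: The inner loop summing helper(n//d, k-1) over every d in [2, n] is replaced by the floor-division block decomposition: iterate only over the O(sqrt(n)) distinct quotients q = n//d and add (block length) * helper(q, k-1).
import Mathlib
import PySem

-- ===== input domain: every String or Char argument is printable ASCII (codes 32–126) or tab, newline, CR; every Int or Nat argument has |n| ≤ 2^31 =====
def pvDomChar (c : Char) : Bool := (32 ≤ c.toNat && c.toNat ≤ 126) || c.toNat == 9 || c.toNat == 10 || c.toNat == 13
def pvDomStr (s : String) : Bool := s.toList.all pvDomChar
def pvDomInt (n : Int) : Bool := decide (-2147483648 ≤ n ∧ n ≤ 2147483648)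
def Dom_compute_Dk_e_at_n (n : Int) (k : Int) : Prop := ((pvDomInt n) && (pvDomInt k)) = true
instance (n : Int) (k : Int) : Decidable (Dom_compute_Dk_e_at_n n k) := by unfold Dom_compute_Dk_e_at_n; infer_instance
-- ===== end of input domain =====

-- B replaces A's inner sum over every d ∈ [2,n] by the floor-division block
-- decomposition (distinct quotients q = n//d weighted by block length);
-- objective: faster.

-- ===== PORT A =====
-- helper(n, k) with the memo dict threaded through; the Nat fuel only makes
-- the recursion structural and is always sufficient (depth ≤ n.toNat + 1).
def pvHelperA : Nat → PySem.Dict (Int × Int) Int → Int → Int → Int × PySem.Dict (Int × Int) Int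
  | 0, m, _, _ => (0, m)
  | Nat.succ fuel, m, n, k =>
    match m.get? (n, k) with
    | some v => (v, m)
    | none =>
      if k = 0 then (1, m)
      else if n < 2 then (0, m)
      else
        let st := (PySem.List.pyRange 2 (n + 1) 1).foldl
          (fun (st : Int × PySem.Dict (Int × Int) Int) d =>
            let r := pvHelperA fuel st.2 (PySem.Int.floordiv n d) (k - 1)
            (st.1 + r.1, r.2)) ((0 : Int), m)
        (st.1, st.2.insert (n, k) st.1)

def compute_Dk_e_at_n (n : Int) (k : Int) : Int :=
  (pvHelperA (n.toNat + 1) PySem.Dict.empty n k).1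

-- ===== PORT B =====
-- helper(n, k) of Source B: memoized, inner `while d <= n` block loop; both
-- fuels are always sufficient (≤ n.toNat + 1).
mutual
def pvHelperB (fuel : Nat) (m : PySem.Dict (Int × Int) Int) (n k : Int) :
    Int × PySem.Dict (Int × Int) Int :=
  match fuel with
  | 0 => (0, m)
  | Nat.succ f =>
    if k = 0 then (1, m)
    else if n < 2 then (0, m)
    else
      match m.get? (n, k) with
      | some v => (v, m)
      | none =>
        let st := pvLoopB f (n.toNat + 1) n k 2 0 m
        (st.1, st.2.insert (n, k) st.1)
termination_by (fuel, 0)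
decreasing_by apply Prod.Lex.left; omega

def pvLoopB (fuel lf : Nat) (n k d total : Int) (m : PySem.Dict (Int × Int) Int) :
    Int × PySem.Dict (Int × Int) Int :=
  match lf with
  | 0 => (total, m)
  | Nat.succ lf' =>
    if d ≤ n then
      let q := PySem.Int.floordiv n d
      let d2 := PySem.Int.floordiv n q
      let r := pvHelperB fuel m q (k - 1)
      pvLoopB fuel lf' n k (d2 + 1) (total + (d2 - d + 1) * r.1) r.2
    else (total, m)
termination_by (fuel, lf)
decreasing_by
  · apply Prod.Lex.right; omega
  · apply Prod.Lex.right; omega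
end

def compute_Dk_e_at_n_alt (n : Int) (k : Int) : Int :=
  (pvHelperB (n.toNat + 1) PySem.Dict.empty n k).1

-- ===== PRECONDITION & SPEC =====
def Spec_compute_Dk_e_at_n (n : Int) (k : Int) (out : Int) : Prop := out = compute_Dk_e_at_n_alt n k
instance (n : Int) (k : Int) (out : Int) : Decidable (Spec_compute_Dk_e_at_n n k out) := by unfold Spec_compute_Dk_e_at_n; infer_instance

-- ===== CLAIM (what is proved, stated in full; the proofs are below) =====
def Claim_equal_compute_Dk_e_at_n : Prop := ∀ (n : Int) (k : Int), Dom_compute_Dk_e_at_n n k → Spec_compute_Dk_e_at_n n k (compute_Dk_e_at_n n k)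

-- ===== LEMMAS AND PROOFS =====

-- Pure (memo-free) reference recursion; both ports are proved equal to it.
def pvG (n k : Int) : Int :=
  if k = 0 then 1
  else if h2 : n < 2 then 0
  else ((PySem.List.pyRange 2 (n + 1) 1).attach.map
          (fun d => pvG (PySem.Int.floordiv n d.1) (k - 1))).sum
termination_by n.toNat
decreasing_by
  have hd := (PySem.List.mem_pyRange_one).1 d.2
  have h1 : PySem.Int.floordiv n d.1 < n :=
    (PySem.Int.floordiv_lt_iff_lt_mul (by omega)).2 (by nlinarith)
  simp; omega

def pvMemoOK (m : PySem.Dict (Int × Int) Int) : Prop :=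
  ∀ p v, m.get? p = some v → v = pvG p.1 p.2

theorem pvG_of_k0 (n k : Int) (hk : k = 0) : pvG n k = 1 := by
  rw [pvG]; simp [hk]

theorem pvG_of_small (n k : Int) (hk : k ≠ 0) (hn : n < 2) : pvG n k = 0 := by
  rw [pvG]; simp [hk, hn]

theorem pvG_of_big (n k : Int) (hk : k ≠ 0) (hn : ¬ n < 2) :
    pvG n k = ((PySem.List.pyRange 2 (n + 1) 1).map
      (fun d => pvG (PySem.Int.floordiv n d) (k - 1))).sum := by
  rw [pvG, if_neg hk, dif_neg hn]
  congr 1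
  exact List.attach_map_val (f := fun d => pvG (PySem.Int.floordiv n d) (k - 1))

theorem pvMemoOK_empty : pvMemoOK PySem.Dict.empty := by
  intro p v h; simp [PySem.Dict.get?_empty] at h

theorem pvMemoOK_insert (m : PySem.Dict (Int × Int) Int) (n k v : Int)
    (hm : pvMemoOK m) (hv : v = pvG n k) : pvMemoOK (m.insert (n, k) v) := by
  intro p w h
  by_cases hp : p = (n, k)
  · subst hp; rw [PySem.Dict.get?_insert_self] at h
    cases h; simpa using hv
  · rw [PySem.Dict.get?_insert_of_ne _ _ hp] at h
    exact hm p w h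

-- the quotient n // e is constant for e across a floor-division block
theorem pvBlock (n d e : Int) (hd : 2 ≤ d) (hdn : d ≤ n)
    (hde : d ≤ e) (he : e ≤ PySem.Int.floordiv n (PySem.Int.floordiv n d)) :
    PySem.Int.floordiv n e = PySem.Int.floordiv n d := by
  have hdpos : (0:Int) < d := by omega
  have hepos : (0:Int) < e := by omega
  set q := PySem.Int.floordiv n d with hq
  have hq1 : 1 ≤ q := by
    rw [hq, PySem.Int.le_floordiv_iff_mul_le hdpos]; omega
  have h1 : q ≤ PySem.Int.floordiv n e := by
    rw [PySem.Int.le_floordiv_iff_mul_le hepos]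
    have := (PySem.Int.le_floordiv_iff_mul_le (by omega : (0:Int) < q)).1 he
    nlinarith
  have h2 : PySem.Int.floordiv n e ≤ q := by
    have hlt : PySem.Int.floordiv n d < q + 1 := by omega
    have hnd := (PySem.Int.floordiv_lt_iff_lt_mul hdpos).1 hlt
    have : n < (q + 1) * e := by nlinarith
    have := (PySem.Int.floordiv_lt_iff_lt_mul hepos).2 this
    omega
  omega

theorem pvBlockBounds (n d : Int) (hn : 2 ≤ n) (hd : 2 ≤ d) (hdn : d ≤ n) :
    d ≤ PySem.Int.floordiv n (PySem.Int.floordiv n d) ∧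
    PySem.Int.floordiv n (PySem.Int.floordiv n d) ≤ n ∧
    1 ≤ PySem.Int.floordiv n d := by
  have hdpos : (0:Int) < d := by omega
  have hq1 : 1 ≤ PySem.Int.floordiv n d := by
    rw [PySem.Int.le_floordiv_iff_mul_le hdpos]; omega
  have hqd : PySem.Int.floordiv n d * d ≤ n :=
    (PySem.Int.le_floordiv_iff_mul_le hdpos).1 (le_refl _)
  refine ⟨?_, ?_, hq1⟩
  · rw [PySem.Int.le_floordiv_iff_mul_le (by omega)]; nlinarith
  · have : PySem.Int.floordiv n (PySem.Int.floordiv n d) < n + 1 := by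
      rw [PySem.Int.floordiv_lt_iff_lt_mul (by omega)]; nlinarith
    omega

-- child arguments are strictly smaller
theorem pvChildLt (n d : Int) (hn : 2 ≤ n) (hd : 2 ≤ d) :
    (PySem.Int.floordiv n d).toNat < n.toNat := by
  have h1 : PySem.Int.floordiv n d < n :=
    (PySem.Int.floordiv_lt_iff_lt_mul (by omega)).2 (by nlinarith)
  have h0 : (0 : Int) ≤ PySem.Int.floordiv n d :=
    (PySem.Int.le_floordiv_iff_mul_le (by omega)).2 (by nlinarith)
  omega

-- ===== correctness of port A =====
theorem pvHelperA_correct : ∀ (fuel : Nat) (n k : Int) (m : PySem.Dict (Int × Int) Int),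
    n.toNat < fuel → pvMemoOK m →
    (pvHelperA fuel m n k).1 = pvG n k ∧ pvMemoOK (pvHelperA fuel m n k).2 := by
  intro fuel
  induction fuel with
  | zero => intro n k m h; omega
  | succ f IH =>
    intro n k m hf hm
    rw [pvHelperA]
    cases hg : m.get? (n, k) with
    | some v => exact ⟨hm (n, k) v hg, hm⟩
    | none =>
      by_cases hk : k = 0
      · simp only [if_pos hk]
        exact ⟨(pvG_of_k0 n k hk).symm, hm⟩
      · by_cases hn : n < 2
        · simp only [if_neg hk, if_pos hn]
          exact ⟨(pvG_of_small n k hk hn).symm, hm⟩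
        · simp only [if_neg hk, if_neg hn]
          have hfold : ∀ (l : List Int) (t : Int) (m0 : PySem.Dict (Int × Int) Int),
              (∀ d ∈ l, 2 ≤ d) → pvMemoOK m0 →
              (l.foldl (fun (st : Int × PySem.Dict (Int × Int) Int) d =>
                  let r := pvHelperA f st.2 (PySem.Int.floordiv n d) (k - 1)
                  (st.1 + r.1, r.2)) (t, m0)).1
                = t + (l.map (fun d => pvG (PySem.Int.floordiv n d) (k - 1))).sum ∧
              pvMemoOK (l.foldl (fun (st : Int × PySem.Dict (Int × Int) Int) d =>
                  let r := pvHelperA f st.2 (PySem.Int.floordiv n d) (k - 1)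
                  (st.1 + r.1, r.2)) (t, m0)).2 := by
            intro l
            induction l with
            | nil => intro t m0 _ hm0; simpa using hm0
            | cons d l ihl =>
              intro t m0 hmem hm0
              have hd2 : 2 ≤ d := hmem d List.mem_cons_self
              have hlt : (PySem.Int.floordiv n d).toNat < f :=
                lt_of_lt_of_le (pvChildLt n d (by omega) hd2) (by omega)
              obtain ⟨hv, hm1⟩ := IH (PySem.Int.floordiv n d) (k - 1) m0 hlt hm0
              simp only [List.foldl_cons, List.map_cons, List.sum_cons]
              obtain ⟨h1, h2⟩ := ihl (t + (pvHelperA f m0 (PySem.Int.floordiv n d) (k - 1)).1)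
                (pvHelperA f m0 (PySem.Int.floordiv n d) (k - 1)).2
                (fun e he => hmem e (List.mem_cons_of_mem _ he)) hm1
              refine ⟨?_, h2⟩
              rw [h1, hv]; ring
          obtain ⟨h1, h2⟩ := hfold (PySem.List.pyRange 2 (n + 1) 1) 0 m
            (fun d hd => ((PySem.List.mem_pyRange_one).1 hd).1) hm
          refine ⟨?_, pvMemoOK_insert _ n k _ h2 ?_⟩ <;>
            · rw [pvG_of_big n k hk hn]
              simpa using h1

-- ===== correctness of port B =====
theorem pvHelperB_correct : ∀ (fuel : Nat) (n k : Int) (m : PySem.Dict (Int × Int) Int),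
    n.toNat < fuel → pvMemoOK m →
    (pvHelperB fuel m n k).1 = pvG n k ∧ pvMemoOK (pvHelperB fuel m n k).2 := by
  intro fuel
  induction fuel with
  | zero => intro n k m h; omega
  | succ f IH =>
    intro n k m hf hm
    rw [pvHelperB]
    by_cases hk : k = 0
    · simp only [if_pos hk]
      exact ⟨(pvG_of_k0 n k hk).symm, hm⟩
    · by_cases hn : n < 2
      · simp only [if_neg hk, if_pos hn]
        exact ⟨(pvG_of_small n k hk hn).symm, hm⟩
      · simp only [if_neg hk, if_neg hn]
        cases hg : m.get? (n, k) with
        | some v => exact ⟨hm (n, k) v hg, hm⟩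
        | none =>
          -- while-loop invariant: the loop from d sums pvG (n//e) (k-1) over e ∈ [d, n]
          have hloop : ∀ (lf : Nat) (d total : Int) (m0 : PySem.Dict (Int × Int) Int),
              2 ≤ d → (n + 1 - d).toNat < lf → pvMemoOK m0 →
              (pvLoopB f lf n k d total m0).1
                = total + ((PySem.List.pyRange d (n + 1) 1).map
                    (fun e => pvG (PySem.Int.floordiv n e) (k - 1))).sum ∧
              pvMemoOK (pvLoopB f lf n k d total m0).2 := by
            intro lf
            induction lf with
            | zero => intro d total m0 _ h; omega
            | succ lf ihl =>
              intro d total m0 hd2 hlf hm0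
              rw [pvLoopB]
              by_cases hdn : d ≤ n
              · simp only [if_pos hdn]
                obtain ⟨hdd2, hd2n, hq1⟩ := pvBlockBounds n d (by omega) hd2 hdn
                have hqlt : (PySem.Int.floordiv n d).toNat < f :=
                  lt_of_lt_of_le (pvChildLt n d (by omega) hd2) (by omega)
                obtain ⟨hv, hm1⟩ := IH (PySem.Int.floordiv n d) (k - 1) m0 hqlt hm0
                obtain ⟨h1, h2⟩ := ihl (PySem.Int.floordiv n (PySem.Int.floordiv n d) + 1)
                  (total + (PySem.Int.floordiv n (PySem.Int.floordiv n d) - d + 1) *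
                    (pvHelperB f m0 (PySem.Int.floordiv n d) (k - 1)).1)
                  (pvHelperB f m0 (PySem.Int.floordiv n d) (k - 1)).2
                  (by omega) (by omega) hm1
                refine ⟨?_, h2⟩
                rw [h1, hv]
                -- split the range at d2 + 1 and evaluate the constant block
                rw [PySem.List.pyRange_one_append d
                  (PySem.Int.floordiv n (PySem.Int.floordiv n d) + 1) (n + 1) (by omega) (by omega)]
                rw [List.map_append, List.sum_append]
                have hconst : (PySem.List.pyRange d
                      (PySem.Int.floordiv n (PySem.Int.floordiv n d) + 1) 1).map
                    (fun e => pvG (PySem.Int.floordiv n e) (k - 1))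
                    = (PySem.List.pyRange d
                      (PySem.Int.floordiv n (PySem.Int.floordiv n d) + 1) 1).map
                      (fun _ => pvG (PySem.Int.floordiv n d) (k - 1)) := by
                  apply List.map_congr_left
                  intro e he
                  have hee := (PySem.List.mem_pyRange_one).1 he
                  rw [pvBlock n d e hd2 hdn hee.1 (by omega)]
                rw [hconst, PySem.List.sum_map_const_int, PySem.List.length_pyRange_one]
                have hcast : (((PySem.Int.floordiv n (PySem.Int.floordiv n d) + 1 - d).toNat : Int))
                    = PySem.Int.floordiv n (PySem.Int.floordiv n d) + 1 - d := by omega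
                rw [hcast]; ring
              · simp only [if_neg hdn]
                rw [PySem.List.pyRange_one_eq_nil (by omega)]
                simpa using hm0
          obtain ⟨h1, h2⟩ := hloop (n.toNat + 1) 2 0 m (le_refl _) (by omega) hm
          refine ⟨?_, pvMemoOK_insert _ n k _ h2 ?_⟩ <;>
            · rw [pvG_of_big n k hk hn]
              simpa using h1

-- ===== VERDICT (by name: the statement is the Claim_ definition above) =====
theorem compute_Dk_e_at_n_spec : Claim_equal_compute_Dk_e_at_n := by
  intro n k _
  unfold Spec_compute_Dk_e_at_n compute_Dk_e_at_n compute_Dk_e_at_n_alt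
  rw [(pvHelperA_correct (n.toNat + 1) n k PySem.Dict.empty (by omega) pvMemoOK_empty).1,
      (pvHelperB_correct (n.toNat + 1) n k PySem.Dict.empty (by omega) pvMemoOK_empty).1]
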